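-- pv_equiv track=rewrite | github.com/messpy/Kenny-bot | cogs/game_commands.py | _build_werewolf_roles
-- ===== SOURCE A (Python) =====
-- def _build_werewolf_roles(n: int) -> list[str]:
--     wolves = 1 if n <= 5 else 2 if n <= 9 else 3
--     roles = ["人狼"] * wolves
--     base = ["占い師", "騎士", "霊媒師"]
--     for r in base:
--         if len(roles) < n:
--             roles.append(r)
--     while len(roles) < n:
--         roles.append("村人")
--     return roles[:n]
-- ===== SOURCE B (Python) =====
-- def _build_werewolf_roles(n: int) -> list[str]:
--     wolves = 1 if n <= 5 else 2 if n <= 9 else 3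
--     base = ["占い師", "騎士", "霊媒師"]
--     specials = base[:max(0, min(3, n - wolves))]
--     villagers = max(0, n - wolves - len(specials))
--     return (["人狼"] * wolves + specials + ["村人"] * villagers)[:n]
-- ===== Notes on version B (the rewrite author's own statement) =====
-- stated objective: simpler
-- what changed: B replaces A's guarded for-loop over the specials and the while-loop appending villagers by arithmetically computed segment sizes (specials = base[:max(0,min(3,n-wolves))], villagers = max(0,n-wolves-len(specials))) and a single concatenation, keeping the final [:n] slice.
import Mathlib
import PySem

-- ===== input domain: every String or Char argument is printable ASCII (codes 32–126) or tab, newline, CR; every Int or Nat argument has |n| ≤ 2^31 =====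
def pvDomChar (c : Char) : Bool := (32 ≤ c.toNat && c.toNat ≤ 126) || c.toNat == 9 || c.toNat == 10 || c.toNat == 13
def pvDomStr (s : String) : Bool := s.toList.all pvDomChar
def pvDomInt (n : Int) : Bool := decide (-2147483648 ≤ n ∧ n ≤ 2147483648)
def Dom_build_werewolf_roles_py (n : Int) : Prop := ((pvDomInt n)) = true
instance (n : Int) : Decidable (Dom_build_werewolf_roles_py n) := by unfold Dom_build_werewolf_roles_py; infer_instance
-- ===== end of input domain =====

-- B replaces A's guarded for-loop and while-loop with arithmetically computed segment sizes
-- concatenated once (objective: simpler); return values agree for every Int n.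

-- ===== PORT A =====
-- the 'while len(roles) < n: roles.append("村人")' loop, step for step
def pvVillLoop (n : Int) (roles : List String) : List String :=
  if (roles.length : Int) < n then pvVillLoop n (roles ++ ["村人"]) else roles
termination_by (n - roles.length).toNat
decreasing_by simp only [List.length_append, List.length_cons, List.length_nil]; omega

def build_werewolf_roles_py (n : Int) : List String :=
  let wolves : Int := if n ≤ 5 then 1 else if n ≤ 9 then 2 else 3
  let roles := List.replicate wolves.toNat "人狼"
  let base := ["占い師", "騎士", "霊媒師"]
  let roles := base.foldl (fun roles r => if (roles.length : Int) < n then roles ++ [r] else roles) roles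
  let roles := pvVillLoop n roles
  PySem.List.slice roles none (some n)

-- ===== PORT B =====
def build_werewolf_roles_py_alt (n : Int) : List String :=
  let wolves : Int := if n ≤ 5 then 1 else if n ≤ 9 then 2 else 3
  let base := ["占い師", "騎士", "霊媒師"]
  let specials := PySem.List.slice base none (some (max 0 (min 3 (n - wolves))))
  let villagers : Int := max 0 (n - wolves - specials.length)
  PySem.List.slice
    (List.replicate wolves.toNat "人狼" ++ specials ++ List.replicate villagers.toNat "村人")
    none (some n)

-- ===== PRECONDITION & SPEC =====
def Spec_build_werewolf_roles_py (n : Int) (out : List String) : Prop := out = build_werewolf_roles_py_alt n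
instance (n : Int) (out : List String) : Decidable (Spec_build_werewolf_roles_py n out) := by unfold Spec_build_werewolf_roles_py; infer_instance

-- ===== CLAIM (what is proved, stated in full; the proofs are below) =====
def Claim_equal_build_werewolf_roles_py : Prop := ∀ (n : Int), Dom_build_werewolf_roles_py n → Spec_build_werewolf_roles_py n (build_werewolf_roles_py n)

-- ===== LEMMAS AND PROOFS =====

-- A's while-loop appends exactly (n - len).toNat villagers
theorem pvVillLoop_eq (n : Int) (roles : List String) :
    pvVillLoop n roles = roles ++ List.replicate (n - roles.length).toNat "村人" := by
  fun_induction pvVillLoop n roles with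
  | case1 roles h ih =>
      rw [ih]
      have hk : (n - (roles.length : Int)).toNat
          = (n - ((roles ++ ["村人"]).length : Int)).toNat + 1 := by
        simp only [List.length_append, List.length_cons, List.length_nil]; omega
      rw [hk, List.replicate_succ]
      simp
  | case2 roles h =>
      have : (n - (roles.length : Int)).toNat = 0 := by omega
      simp [this]

-- the pre-slice lists of A and B coincide for any wolf count w >= 1
theorem pre_slice_eq (n w : Int) (hw : 1 ≤ w) :
    (let R := List.foldl (fun roles r => if (roles.length : Int) < n then roles ++ [r] else roles)
        (List.replicate w.toNat "人狼") ["占い師", "騎士", "霊媒師"]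
     R ++ List.replicate (n - R.length).toNat "村人")
    = (let S := PySem.List.slice ["占い師", "騎士", "霊媒師"] none (some (max 0 (min 3 (n - w))))
       List.replicate w.toNat "人狼" ++ S ++ List.replicate (max 0 (n - w - S.length)).toNat "村人") := by
  simp only [List.foldl]
  rw [PySem.List.slice_to _ (le_max_left 0 _)]
  rcases le_or_gt n w with h0 | hgt
  · have hk : (max 0 (min 3 (n - w))).toNat = 0 := by omega
    simp [hk, show ¬ (w < n ∧ 0 < n) from by omega]
    omega
  · rcases eq_or_lt_of_le (show w + 1 ≤ n by omega) with h1 | hgt2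
    · have hk : (max 0 (min 3 (n - w))).toNat = 1 := by omega
      simp [hk, show w < n ∧ 0 < n from by omega, show ¬ (max w 0 + 1 < n) from by omega]
      omega
    · rcases eq_or_lt_of_le (show w + 2 ≤ n by omega) with h2 | hgt3
      · have hk : (max 0 (min 3 (n - w))).toNat = 2 := by omega
        simp [hk, show w < n ∧ 0 < n from by omega, show max w 0 + 1 < n from by omega,
          show ¬ (max w 0 + 2 < n) from by omega]
        omega
      · have hk : (max 0 (min 3 (n - w))).toNat = 3 := by omega
        simp [hk, show w < n ∧ 0 < n from by omega, show max w 0 + 1 < n from by omega,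
          show max w 0 + 2 < n from by omega]
        omega

-- ===== VERDICT (by name: the statement is the Claim_ definition above) =====
theorem build_werewolf_roles_py_spec : Claim_equal_build_werewolf_roles_py := by
  intro n _
  unfold Spec_build_werewolf_roles_py build_werewolf_roles_py build_werewolf_roles_py_alt
  simp only
  rw [pvVillLoop_eq]
  congr 1
  split_ifs with h5 h9
  · exact pre_slice_eq n 1 (by omega)
  · exact pre_slice_eq n 2 (by omega)
  · exact pre_slice_eq n 3 (by omega)
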